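-- pv_equiv track=rewrite | github.com/FocusedLoop/203 | tutorial7S2.py | distanceClasses
-- ===== SOURCE A (Python) =====
-- def NS(V, E, S):
--    """Returns the set of vertices in V that are adjacent to a vertex in S given edges E.
--
--    If (V,E) is the entire graph, returns the neighbourhood of S."""
--    return { v for v in V for u in S if (u,v) in E }
--
-- def distanceClasses(V, E, u, D = None):
--    """Given a graph (V,E) and a starting vertex u, outputs a list of distances classes.  That is, returns a partition of the vertices into sets of fixed distances from u, where u is in the distance class for distance 0.  Behaviour is undefined if the graph is disconnected."""
--    if D is None:                             # j = 0 case
--       D = [ {u} ]                            # D[0] = D_0 = {u}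
--       return distanceClasses(V, E, None, D)  # recurse to get remaining distance classes
--
--    Vnew = V - D[-1]                          # V_{j} = V_{j-1} / D_{j-1}
--    Dnew = D + [ NS(Vnew, E, D[-1]) ]         # D_{j} = N_{V_j}(D_{j-1})
--    if len(Dnew[-1]) == 0: return D           # Didn't find any more vertices.  All done or G is disconnected.
--    return distanceClasses(Vnew, E, None, Dnew)
-- ===== SOURCE B (Python) =====
-- def distanceClasses(V, E, u, D = None):
--    """BFS re-implementation: one adjacency pass over E, level-by-level BFS with a
--    visited set, then one grouping pass over V — instead of A's repeated set
--    differences and quadratic neighbourhood rescans per level."""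
--    adj = {}
--    for a, b in E:
--       adj.setdefault(a, []).append(b)
--    base = [ {u} ] if D is None else list(D)
--    frontier = list(base[-1])
--    Vset = set(V)
--    visited = set(frontier)
--    dist = {}
--    k = 1
--    while frontier:
--       nxt = []
--       for x in frontier:
--          for y in adj.get(x, []):
--             if y in Vset and y not in visited:
--                visited.add(y)
--                dist[y] = k
--                nxt.append(y)
--       if not nxt:
--          break
--       frontier = nxt
--       k += 1
--    group = {}
--    for v in V:
--       j = dist.get(v)
--       if j is not None:
--          group.setdefault(j, []).append(v)
--    return base + [ set(group.get(j, [])) for j in range(1, k) ]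
-- ===== Notes on version B (the rewrite author's own statement) =====
-- stated objective: faster
-- what changed: A recomputes a neighbourhood by scanning all remaining vertices against the whole previous class at every level and rebuilds the vertex set by repeated set differences; B builds an adjacency dict once, runs a level-by-level BFS with a visited set, and groups vertices by their recorded BFS level in one pass over V.
-- outside the precondition, e.g. on distanceClasses({1, 2}, {(1, 2)}, 1, []): A raises IndexError, B raises IndexError
import Mathlib
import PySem

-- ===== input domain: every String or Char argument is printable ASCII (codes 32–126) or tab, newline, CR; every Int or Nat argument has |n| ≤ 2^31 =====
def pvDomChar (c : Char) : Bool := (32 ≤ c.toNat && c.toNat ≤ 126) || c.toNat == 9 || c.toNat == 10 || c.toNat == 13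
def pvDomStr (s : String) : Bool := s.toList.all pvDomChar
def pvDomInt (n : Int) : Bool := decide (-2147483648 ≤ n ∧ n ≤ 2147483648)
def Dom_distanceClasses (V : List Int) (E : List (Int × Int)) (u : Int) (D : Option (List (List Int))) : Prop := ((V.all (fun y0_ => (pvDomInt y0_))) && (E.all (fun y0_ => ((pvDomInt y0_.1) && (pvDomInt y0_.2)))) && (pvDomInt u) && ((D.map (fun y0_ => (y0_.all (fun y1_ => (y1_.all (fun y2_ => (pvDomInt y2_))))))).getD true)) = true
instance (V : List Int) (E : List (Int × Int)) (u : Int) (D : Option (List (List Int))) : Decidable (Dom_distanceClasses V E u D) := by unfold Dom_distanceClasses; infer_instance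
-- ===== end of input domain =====

-- B replaces A's per-level rescans of all remaining vertices (repeated set differences +
-- NS recomputation) by one adjacency dict, a level-by-level BFS and one grouping pass.

-- ===== PORT A =====

-- NS(V, E, S) = { v for v in V for u in S if (u,v) in E }
def pyNS (V : List Int) (E : List (Int × Int)) (S : List Int) : List Int :=
  PySem.Set.ofList (V.flatMap (fun v => (S.filter (fun u => decide ((u, v) ∈ E))).map (fun _ => v)))

-- used by dcGo's termination proof: every member of NS(V,E,S) is a member of V
theorem pyNS_mem {V : List Int} {E : List (Int × Int)} {S : List Int} {y : Int}
    (h : y ∈ pyNS V E S) : y ∈ V := by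
  simp only [pyNS, PySem.Set.mem_ofList, List.mem_flatMap, List.mem_map] at h
  obtain ⟨v, hv, _, _, rfl⟩ := h
  exact hv

-- the body of A once D is not None: Vnew = V - D[-1]; Dnew = D + [NS(Vnew,E,D[-1])]; …
def dcGo (V : List Int) (E : List (Int × Int)) (D : List (List Int)) : List (List Int) :=
  match hD : D.getLast? with
  | none => []          -- Python raises IndexError at D[-1] when D = [] (excluded by Pre_)
  | some last =>
    let Vnew := PySem.Set.diff V last
    let newC := pyNS Vnew E last
    if newC = [] then D else dcGo Vnew E (D ++ [newC])
termination_by 2 * V.length + (if ∀ x ∈ D.getLast?.getD [], x ∉ V then 1 else 0)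
decreasing_by
  rename_i hne
  obtain ⟨y, hy⟩ := List.exists_mem_of_ne_nil _ hne
  have hyV : y ∈ PySem.Set.diff V last := pyNS_mem hy
  rw [hD]
  simp only [List.getLast?_concat, Option.getD_some]
  have hind : ¬ (∀ x ∈ pyNS (PySem.Set.diff V last) E last, x ∉ PySem.Set.diff V last) := by
    intro hall; exact hall y hy hyV
  rw [if_neg hind]
  have hlen : (PySem.Set.diff V last).length ≤ V.length := by
    simp only [PySem.Set.diff]; exact List.length_filter_le _ _
  by_cases hc : ∀ x ∈ last, x ∉ V
  · rw [if_pos hc]; omega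
  · rw [if_neg hc]
    push_neg at hc
    obtain ⟨x, hxl, hxV⟩ := hc
    have : (PySem.Set.diff V last).length < V.length := by
      simp only [PySem.Set.diff]
      refine List.length_filter_lt_length_iff_exists.mpr ⟨x, hxV, ?_⟩
      simp [PySem.Set.contains_iff, hxl]
    omega

def distanceClasses (V : List Int) (E : List (Int × Int)) (u : Int) (D : Option (List (List Int))) : List (List Int) :=
  match D with
  | none => dcGo V E [[u]]      -- D = [{u}]; recurse with the remaining distance classes
  | some d => dcGo V E d

-- ===== PORT B =====

-- adj = {}; for a, b in E: adj.setdefault(a, []).append(b)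
def buildAdj (E : List (Int × Int)) : PySem.Dict Int (List Int) :=
  E.foldl (fun d p => d.modify p.1 [] (fun l => l ++ [p.2])) PySem.Dict.empty

-- one pass of the while-loop body: state = (visited, dist, nxt)
def bfsStep (adj : PySem.Dict Int (List Int)) (Vset : PySem.Set Int) (k : Int)
    (frontier : List Int) (st : PySem.Set Int × PySem.Dict Int Int × List Int) :
    PySem.Set Int × PySem.Dict Int Int × List Int :=
  frontier.foldl (fun st x =>
    (adj.getD x []).foldl (fun st y =>
      if y ∈ Vset ∧ y ∉ st.1 then (PySem.Set.add st.1 y, st.2.1.insert y k, st.2.2 ++ [y])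
      else st) st) st

-- characterisation of bfsStep (also cited by bfs's termination proof): the inner fold
theorem bfsStep_inner (adj : PySem.Dict Int (List Int)) (Vset : PySem.Set Int) (k : Int)
    (vis : PySem.Set Int) (dist : PySem.Dict Int Int) (nxt0 : List Int) (ys : List Int) :
    ∀ Δ : List Int,
    ∃ Δ' : List Int,
      ys.foldl (fun st y =>
          if y ∈ Vset ∧ y ∉ st.1 then (PySem.Set.add st.1 y, st.2.1.insert y k, st.2.2 ++ [y])
          else st)
        (PySem.Set.update vis Δ, Δ.foldl (fun d y => d.insert y k) dist, nxt0 ++ Δ)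
      = (PySem.Set.update vis (Δ ++ Δ'), (Δ ++ Δ').foldl (fun d y => d.insert y k) dist, nxt0 ++ (Δ ++ Δ'))
      ∧ (∀ y ∈ Δ', y ∈ ys ∧ y ∈ Vset ∧ y ∉ PySem.Set.update vis Δ)
      ∧ (∀ y ∈ ys, y ∈ Vset → y ∈ PySem.Set.update vis (Δ ++ Δ')) := by
  induction ys with
  | nil => intro Δ; exact ⟨[], by simp, by simp, by simp⟩
  | cons y t ih =>
    intro Δ
    by_cases hy : y ∈ Vset ∧ y ∉ PySem.Set.update vis Δ
    · obtain ⟨Δ', h1, h2, h3⟩ := ih (Δ ++ [y])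
      refine ⟨y :: Δ', ?_, ?_, ?_⟩
      · simp only [List.foldl_cons, if_pos hy]
        have e1 : PySem.Set.add (PySem.Set.update vis Δ) y = PySem.Set.update vis (Δ ++ [y]) := by
          rw [PySem.Set.update_append vis Δ [y]]
          simp [PySem.Set.update_cons, PySem.Set.update_nil]
        have e2 : (Δ.foldl (fun d y => d.insert y k) dist).insert y k
            = (Δ ++ [y]).foldl (fun d y => d.insert y k) dist := by
          rw [List.foldl_append]; rfl
        rw [e1, e2, show nxt0 ++ Δ ++ [y] = nxt0 ++ (Δ ++ [y]) by simp]
        rw [h1]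
        simp
      · intro z hz
        rcases List.mem_cons.mp hz with rfl | hz
        · exact ⟨List.mem_cons_self, hy.1, hy.2⟩
        · obtain ⟨hz1, hz2, hz3⟩ := h2 z hz
          refine ⟨List.mem_cons_of_mem _ hz1, hz2, fun hmem => hz3 ?_⟩
          rw [PySem.Set.update_append vis Δ [y]]
          have : z ∈ PySem.Set.update vis Δ → z ∈ PySem.Set.update (PySem.Set.update vis Δ) [y] := by
            intro h; rw [PySem.Set.mem_update]; exact Or.inl h
          exact this hmem
      · intro z hz hzV
        rcases List.mem_cons.mp hz with rfl | hz
        · simp [PySem.Set.mem_update]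
        · have := h3 z hz hzV
          simp only [PySem.Set.mem_update, List.mem_append, List.mem_cons] at this ⊢
          tauto
    · obtain ⟨Δ', h1, h2, h3⟩ := ih Δ
      refine ⟨Δ', ?_, ?_, ?_⟩
      · simp only [List.foldl_cons, if_neg hy]; exact h1
      · intro z hz
        obtain ⟨hz1, hz2, hz3⟩ := h2 z hz
        exact ⟨List.mem_cons_of_mem _ hz1, hz2, hz3⟩
      · intro z hz hzV
        rcases List.mem_cons.mp hz with rfl | hz
        · rcases Classical.em (z ∈ PySem.Set.update vis Δ) with hin | hnin
          · rw [PySem.Set.mem_update] at hin ⊢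
            rcases hin with h | h
            · exact Or.inl h
            · exact Or.inr (by simp [h])
          · exact absurd ⟨hzV, hnin⟩ hy
        · exact h3 z hz hzV

theorem bfsStep_char (adj : PySem.Dict Int (List Int)) (Vset : PySem.Set Int) (k : Int)
    (frontier : List Int) (vis : PySem.Set Int) (dist : PySem.Dict Int Int) (nxt0 : List Int) :
    ∃ Δ : List Int,
      bfsStep adj Vset k frontier (vis, dist, nxt0)
        = (PySem.Set.update vis Δ, Δ.foldl (fun d y => d.insert y k) dist, nxt0 ++ Δ)
      ∧ (∀ y ∈ Δ, y ∈ Vset ∧ y ∉ vis ∧ ∃ x ∈ frontier, y ∈ adj.getD x [])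
      ∧ (∀ y, y ∈ Vset → (∃ x ∈ frontier, y ∈ adj.getD x []) → y ∈ PySem.Set.update vis Δ) := by
  suffices h : ∀ (fr : List Int) (Δ : List Int),
      ∃ Δ' : List Int,
        fr.foldl (fun st x =>
            (adj.getD x []).foldl (fun st y =>
              if y ∈ Vset ∧ y ∉ st.1 then (PySem.Set.add st.1 y, st.2.1.insert y k, st.2.2 ++ [y])
              else st) st)
          (PySem.Set.update vis Δ, Δ.foldl (fun d y => d.insert y k) dist, nxt0 ++ Δ)
        = (PySem.Set.update vis (Δ ++ Δ'), (Δ ++ Δ').foldl (fun d y => d.insert y k) dist, nxt0 ++ (Δ ++ Δ'))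
        ∧ (∀ y ∈ Δ', y ∈ Vset ∧ y ∉ PySem.Set.update vis Δ ∧ ∃ x ∈ fr, y ∈ adj.getD x [])
        ∧ (∀ y, y ∈ Vset → (∃ x ∈ fr, y ∈ adj.getD x []) → y ∈ PySem.Set.update vis (Δ ++ Δ')) by
    obtain ⟨Δ', h1, h2, h3⟩ := h frontier []
    refine ⟨Δ', ?_, ?_, ?_⟩
    · unfold bfsStep
      simp only [PySem.Set.update_nil, List.foldl_nil, List.append_nil, List.nil_append] at h1
      simpa using h1
    · intro y hy
      obtain ⟨h1', h2', h3'⟩ := h2 y hy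
      refine ⟨h1', ?_, h3'⟩
      rw [PySem.Set.update_nil] at h2'; exact h2'
    · intro y hyV hadj
      have := h3 y hyV hadj
      simpa using this
  intro fr
  induction fr with
  | nil => intro Δ; exact ⟨[], by simp, by simp, by simp⟩
  | cons x t ih =>
    intro Δ
    obtain ⟨Δ₁, h1, h2, h3⟩ := bfsStep_inner adj Vset k vis dist nxt0 (adj.getD x []) Δ
    obtain ⟨Δ₂, g1, g2, g3⟩ := ih (Δ ++ Δ₁)
    refine ⟨Δ₁ ++ Δ₂, ?_, ?_, ?_⟩
    · simp only [List.foldl_cons]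
      rw [h1, g1]
      simp [List.append_assoc]
    · intro y hy
      rcases List.mem_append.mp hy with hy1 | hy2
      · obtain ⟨ha, hb, hc⟩ := h2 y hy1
        exact ⟨hb, hc, ⟨x, List.mem_cons_self, ha⟩⟩
      · obtain ⟨ha, hb, hc⟩ := g2 y hy2
        refine ⟨ha, fun hmem => hb ?_, ?_⟩
        · rw [PySem.Set.update_append vis Δ Δ₁, PySem.Set.mem_update]; exact Or.inl hmem
        · obtain ⟨x', hx', hy'⟩ := hc
          exact ⟨x', List.mem_cons_of_mem _ hx', hy'⟩
    · intro y hyV hadj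
      obtain ⟨x', hx', hy'⟩ := hadj
      rcases List.mem_cons.mp hx' with rfl | hx'
      · have := h3 y hy' hyV
        simp only [PySem.Set.mem_update, List.mem_append] at this ⊢
        tauto
      · have := g3 y hyV ⟨x', hx', hy'⟩
        simp only [PySem.Set.mem_update, List.mem_append] at this ⊢
        tauto

-- used by bfs's termination proof
theorem filter_length_strict {α : Type} (l : List α) (p q : α → Bool)
    (himp : ∀ x, q x = true → p x = true) (x : α) (hx : x ∈ l)
    (hp : p x = true) (hq : q x = false) : (l.filter q).length < (l.filter p).length := by
  induction l with
  | nil => cases hx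
  | cons a t ih =>
    have hle : ∀ (u : List α), (u.filter q).length ≤ (u.filter p).length :=
      fun u => (List.monotone_filter_right u himp).length_le
    rcases List.mem_cons.mp hx with rfl | hx
    · simp only [List.filter_cons, hp, hq]
      simpa using Nat.lt_succ_of_le (hle t)
    · have ih' := ih hx
      simp only [List.filter_cons]
      by_cases hqa : q a = true
      · have hpa : p a = true := himp a hqa
        simp [hqa, hpa]; omega
      · simp only [Bool.not_eq_true] at hqa
        rw [hqa]
        by_cases hpa : p a = true
        · simp [hpa]; omega
        · simp only [Bool.not_eq_true] at hpa
          rw [hpa]; simpa using ih'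

theorem not_contains_iff (s : PySem.Set Int) (x : Int) :
    (!(PySem.Set.contains s x)) = true ↔ x ∉ s := by
  rw [← PySem.Set.contains_iff]
  cases PySem.Set.contains s x <;> simp

-- the while-loop: returns (dist, k)
def bfs (adj : PySem.Dict Int (List Int)) (Vset : PySem.Set Int) (frontier : List Int)
    (visited : PySem.Set Int) (dist : PySem.Dict Int Int) (k : Int) :
    PySem.Dict Int Int × Int :=
  if frontier = [] then (dist, k)
  else
    let st := bfsStep adj Vset k frontier (visited, dist, [])
    if st.2.2 = [] then (st.2.1, k)
    else bfs adj Vset st.2.2 st.1 st.2.1 (k + 1)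
termination_by (Vset.filter (fun v => !(PySem.Set.contains visited v))).length
decreasing_by
  rename_i hne hΔne
  obtain ⟨Δ, heq, hsound, _⟩ := bfsStep_char adj Vset k frontier visited dist []
  have hst1 : st.1 = PySem.Set.update visited Δ := by
    rw [show st = bfsStep adj Vset k frontier (visited, dist, []) from rfl, heq]
  have hst3 : st.2.2 = Δ := by
    rw [show st = bfsStep adj Vset k frontier (visited, dist, []) from rfl, heq]; simp
  rw [hst3] at hΔne
  obtain ⟨y, hy⟩ := List.exists_mem_of_ne_nil _ hΔne
  obtain ⟨hyV, hyvis, _⟩ := hsound y hy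
  rw [hst1]
  apply filter_length_strict Vset _ _ ?_ y hyV ?_ ?_
  · intro z h
    rw [not_contains_iff] at h ⊢
    intro hc
    exact h (by rw [PySem.Set.mem_update]; exact Or.inl hc)
  · rw [not_contains_iff]; exact hyvis
  · have hmem : y ∈ PySem.Set.update visited Δ := by
      rw [PySem.Set.mem_update]; exact Or.inr hy
    have h2 : PySem.Set.contains (PySem.Set.update visited Δ) y = true :=
      (PySem.Set.contains_iff _ _).mpr hmem
    rw [h2]; rfl

def distanceClasses_alt (V : List Int) (E : List (Int × Int)) (u : Int) (D : Option (List (List Int))) : List (List Int) :=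
  let adj := buildAdj E
  let base := match D with | none => [[u]] | some d => d
  let frontier := base.getLast?.getD []     -- base[-1]; D = some [] (IndexError in A and B) is excluded by Pre_
  let r := bfs adj (PySem.Set.ofList V) frontier (PySem.Set.ofList frontier) PySem.Dict.empty 1
  let group := V.foldl (fun g v =>
      match r.1.get? v with
      | some j => g.modify j ([] : List Int) (fun l => l ++ [v])
      | none => g) PySem.Dict.empty
  base ++ (PySem.List.pyRange 1 r.2 1).map (fun j => PySem.Set.ofList (group.getD j []))

-- ===== PRECONDITION & SPEC =====

-- Pre_ excludes D = some [] (Python: IndexError at D[-1] in both A and B); V, drawn as a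
-- Python set, is required to hold distinct elements (the List-encoding of a set).
def Pre_distanceClasses (V : List Int) (E : List (Int × Int)) (u : Int) (D : Option (List (List Int))) : Prop :=
  V.Nodup ∧ D ≠ some []
instance (V : List Int) (E : List (Int × Int)) (u : Int) (D : Option (List (List Int))) : Decidable (Pre_distanceClasses V E u D) := by unfold Pre_distanceClasses; infer_instance

def pvWitness_distanceClasses : List Int × (List (Int × Int)) × Int × Option (List (List Int)) :=
  ([1, 2, 3], [(1, 2), (2, 3)], 1, none)

def Spec_distanceClasses (V : List Int) (E : List (Int × Int)) (u : Int) (D : Option (List (List Int))) (out : List (List Int)) : Prop := out = distanceClasses_alt V E u D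
instance (V : List Int) (E : List (Int × Int)) (u : Int) (D : Option (List (List Int))) (out : List (List Int)) : Decidable (Spec_distanceClasses V E u D out) := by unfold Spec_distanceClasses; infer_instance

-- ===== CLAIM (what is proved, stated in full; the proofs are below) =====
def Claim_equal_distanceClasses : Prop := ∀ (V : List Int) (E : List (Int × Int)) (u : Int) (D : Option (List (List Int))), Dom_distanceClasses V E u D → Pre_distanceClasses V E u D → Spec_distanceClasses V E u D (distanceClasses V E u D)

-- ===== LEMMAS AND PROOFS =====

theorem contains_eq_false_iff (s : PySem.Set Int) (x : Int) :
    PySem.Set.contains s x = false ↔ x ∉ s := by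
  rw [Bool.eq_false_iff, Ne, PySem.Set.contains_iff]

-- Reference form of A's recursion: per level, remaining vertices and the next class as filters.
def layersRn (S R : List Int) : List Int := R.filter (fun v => !decide (v ∈ S))
def layersC (E : List (Int × Int)) (S Rn : List Int) : List Int :=
  Rn.filter (fun v => S.any (fun u => decide ((u, v) ∈ E)))

def layers (E : List (Int × Int)) (R : List Int) (S : List Int) : List (List Int) :=
  if layersC E S (layersRn S R) = [] then []
  else layersC E S (layersRn S R) :: layers E (layersRn S R) (layersC E S (layersRn S R))
termination_by 2 * R.length + (if ∀ x ∈ S, x ∉ R then 1 else 0)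
decreasing_by
  rename_i h
  obtain ⟨y, hy⟩ := List.exists_mem_of_ne_nil _ h
  have hyRn : y ∈ layersRn S R := List.mem_of_mem_filter hy
  have hind : ¬ (∀ x ∈ layersC E S (layersRn S R), x ∉ layersRn S R) := by
    intro hall; exact hall y hy hyRn
  rw [if_neg hind]
  have hlen : (layersRn S R).length ≤ R.length := List.length_filter_le _ _
  by_cases hc : ∀ x ∈ S, x ∉ R
  · rw [if_pos hc]; omega
  · rw [if_neg hc]
    push_neg at hc
    obtain ⟨x, hxS, hxR⟩ := hc
    have : (layersRn S R).length < R.length :=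
      List.length_filter_lt_length_iff_exists.mpr ⟨x, hxR, by simp [hxS]⟩
    omega

theorem discard_cons_self (s : PySem.Set Int) (v : Int) :
    PySem.Set.discard (v :: s) v = PySem.Set.discard s v := by
  simp [PySem.Set.discard]

theorem discard_discard_self (s : PySem.Set Int) (v : Int) :
    PySem.Set.discard (PySem.Set.discard s v) v = PySem.Set.discard s v := by
  simp [PySem.Set.discard, List.filter_filter]

theorem discard_ofList_of_not_mem {l : List Int} {v : Int} (h : v ∉ l) :
    PySem.Set.discard (PySem.Set.ofList l) v = PySem.Set.ofList l := by
  simp only [PySem.Set.discard]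
  apply List.filter_eq_self.mpr
  intro x hx
  have hxl : x ∈ l := by simpa [PySem.Set.mem_ofList] using hx
  simp
  rintro rfl
  exact h hxl

theorem discard_ofList_append_const (v : Int) (l' l : List Int) (hl' : ∀ z ∈ l', z = v) :
    PySem.Set.discard (PySem.Set.ofList (l' ++ l)) v = PySem.Set.discard (PySem.Set.ofList l) v := by
  induction l' with
  | nil => simp
  | cons z t ih =>
    have hz : z = v := hl' z List.mem_cons_self
    subst hz
    rw [List.cons_append, PySem.Set.ofList_cons, discard_cons_self, discard_discard_self]
    exact ih (fun z hz => hl' z (List.mem_cons_of_mem _ hz))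

theorem ofList_flatMap_const (f : Int → List Int) :
    ∀ (W : List Int), W.Nodup →
    PySem.Set.ofList (W.flatMap (fun v => List.replicate (f v).length v))
      = W.filter (fun v => !(f v).isEmpty) := by
  intro W
  induction W with
  | nil => intro _; simp
  | cons v t ih =>
    intro hW
    obtain ⟨hv, ht⟩ := List.nodup_cons.mp hW
    simp only [List.flatMap_cons, List.filter_cons]
    cases hfv : f v with
    | nil =>
      simp only [List.length_nil, List.replicate_zero, List.nil_append,
        List.isEmpty_nil, Bool.not_true, if_neg (by simp : ¬(false = true))]
      exact ih ht
    | cons b bs =>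
      have hnotflat : v ∉ t.flatMap (fun v => List.replicate (f v).length v) := by
        intro hmem
        simp only [List.mem_flatMap] at hmem
        obtain ⟨w, hw, hrep⟩ := hmem
        have := List.eq_of_mem_replicate hrep
        subst this
        exact hv hw
      simp only [List.length_cons, List.replicate_succ, List.cons_append, PySem.Set.ofList_cons]
      rw [discard_ofList_append_const v (List.replicate bs.length v) _
            (fun z hz => List.eq_of_mem_replicate hz)]
      rw [discard_ofList_of_not_mem hnotflat]
      simp only [List.isEmpty_cons, Bool.not_false]
      rw [ih ht]
      simp

theorem not_isEmpty_filter_eq_any (l : List Int) (q : Int → Bool) :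
    (!(l.filter q).isEmpty) = l.any q := by
  cases h : l.any q with
  | false =>
    have hnil : l.filter q = [] := List.filter_eq_nil_iff.mpr (by
      intro x hx hq
      have := List.any_eq_true.mpr ⟨x, hx, hq⟩
      rw [h] at this; cases this)
    simp [hnil]
  | true =>
    obtain ⟨x, hx, hq⟩ := List.any_eq_true.mp h
    have hne : l.filter q ≠ [] := by
      intro hc
      have : x ∈ l.filter q := List.mem_filter.mpr ⟨hx, hq⟩
      rw [hc] at this; cases this
    have h2 : (l.filter q).isEmpty = false := by
      cases hfq : (l.filter q).isEmpty
      · rfl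
      · exact absurd (List.isEmpty_iff.mp hfq) hne
    simp [h2]

theorem pyNS_filter (W : List Int) (E : List (Int × Int)) (S : List Int) (hW : W.Nodup) :
    pyNS W E S = W.filter (fun v => S.any (fun u => decide ((u, v) ∈ E))) := by
  have hmap : ∀ v : Int, (S.filter (fun u => decide ((u, v) ∈ E))).map (fun _ => v)
      = List.replicate (S.filter (fun u => decide ((u, v) ∈ E))).length v := by
    intro v; exact List.map_const' 
  rw [pyNS]
  simp only [hmap]
  rw [ofList_flatMap_const (fun v => S.filter (fun u => decide ((u, v) ∈ E))) W hW]
  exact List.filter_congr (fun v _ => not_isEmpty_filter_eq_any S _)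

theorem adj_getD (E : List (Int × Int)) (x : Int) :
    (buildAdj E).getD x [] = (E.filter (fun p => p.1 == x)).map (·.2) := by
  unfold buildAdj
  rw [PySem.Dict.getD_foldl_modify_append]
  simp

theorem mem_adj (E : List (Int × Int)) (x y : Int) :
    y ∈ (buildAdj E).getD x [] ↔ (x, y) ∈ E := by
  rw [adj_getD]
  simp only [List.mem_map, List.mem_filter, beq_iff_eq]
  constructor
  · rintro ⟨⟨a, b⟩, ⟨hmem, rfl⟩, rfl⟩
    exact hmem
  · intro h
    exact ⟨(x, y), ⟨h, rfl⟩, rfl⟩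

theorem group_getD (dist : PySem.Dict Int Int) (c : Int) :
    ∀ (V : List Int) (g : PySem.Dict Int (List Int)),
    (V.foldl (fun g v => match dist.get? v with
        | some j => g.modify j ([] : List Int) (fun l => l ++ [v])
        | none => g) g).getD c []
      = g.getD c [] ++ V.filter (fun v => dist.get? v == some c) := by
  intro V
  induction V with
  | nil => intro g; simp
  | cons v t ih =>
    intro g
    simp only [List.foldl_cons, List.filter_cons]
    cases h : dist.get? v with
    | none =>
      simp only [h]
      rw [ih g]
      simp
    | some j =>
      simp only [h]
      rw [ih (g.modify j ([] : List Int) (fun l => l ++ [v]))]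
      rw [PySem.Dict.getD_modify g j c ([] : List Int) (fun l => l ++ [v])]
      by_cases hc : c = j
      · subst hc
        simp
      · have : (some j == some c) = false := by simpa using (fun h => hc h.symm)
        simp [hc, this]

theorem distUpd_get? (k : Int) :
    ∀ (Δ : List Int) (d : PySem.Dict Int Int) (v : Int),
    (Δ.foldl (fun d y => d.insert y k) d).get? v = if v ∈ Δ then some k else d.get? v := by
  intro Δ
  induction Δ with
  | nil => intro d v; simp
  | cons y t ih =>
    intro d v
    simp only [List.foldl_cons]
    rw [ih]
    rw [PySem.Dict.get?_insert d y v k]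
    by_cases hv : v ∈ t
    · simp [hv]
    · by_cases hvy : v = y <;> simp [hv, hvy]

theorem pyRange_one_nil {a b : Int} (h : b ≤ a) : PySem.List.pyRange a b 1 = [] := by
  simp [PySem.List.pyRange]
  omega

theorem filter_mem_filter (V : List Int) (s : Int → Bool) :
    V.filter (fun v => decide (v ∈ V.filter s)) = V.filter s :=
  List.filter_congr (fun v hv => by simp [List.mem_filter, hv])

theorem bfs_layers (E : List (Int × Int)) (V : List Int) :
    ∀ (fr : List Int) (vis : PySem.Set Int) (dist : PySem.Dict Int Int) (k : Int) (R S : List Int),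
      R.filter (fun v => !decide (v ∈ S)) = V.filter (fun v => !(PySem.Set.contains vis v)) →
      (∀ y : Int, y ∈ fr ↔ y ∈ S) →
      (∀ (v j : Int), dist.get? v = some j → j < k) →
      (∀ v : Int, v ∉ vis → dist.get? v = none) →
      ((PySem.List.pyRange k (bfs (buildAdj E) (PySem.Set.ofList V) fr vis dist k).2 1).map
          (fun j => V.filter (fun v => (bfs (buildAdj E) (PySem.Set.ofList V) fr vis dist k).1.get? v == some j))
        = layers E R S)
      ∧ k ≤ (bfs (buildAdj E) (PySem.Set.ofList V) fr vis dist k).2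
      ∧ (∀ (v j : Int), (bfs (buildAdj E) (PySem.Set.ofList V) fr vis dist k).1.get? v = some j →
          dist.get? v = some j ∨ (k ≤ j ∧ j < (bfs (buildAdj E) (PySem.Set.ofList V) fr vis dist k).2))
      ∧ (∀ (v j : Int), dist.get? v = some j →
          (bfs (buildAdj E) (PySem.Set.ofList V) fr vis dist k).1.get? v = some j) := by
  intro fr vis dist k
  fun_induction bfs (buildAdj E) (PySem.Set.ofList V) fr vis dist k with
  | case1 vis dist k =>
    intro R S hRS hfs hdb hdv
    dsimp only
    have hSnil : S = [] := List.eq_nil_iff_forall_not_mem.mpr (fun y hy => by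
      have := (hfs y).mpr hy
      cases this)
    subst hSnil
    have hCnil : layersC E [] (layersRn [] R) = [] := by
      unfold layersC
      apply List.filter_eq_nil_iff.mpr
      intro x _ hx
      simp at hx
    rw [layers, if_pos hCnil]
    refine ⟨?_, le_refl k, fun v j h => Or.inl h, fun v j h => h⟩
    rw [pyRange_one_nil (le_refl k)]
    simp
  | case2 fr vis dist k hfr st hst =>
    intro R S hRS hfs hdb hdv
    obtain ⟨Δ, heq, hsound, hcomp⟩ := bfsStep_char (buildAdj E) (PySem.Set.ofList V) k fr vis dist []
    have hstd : st = bfsStep (buildAdj E) (PySem.Set.ofList V) k fr (vis, dist, []) := rfl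
    have e3 : st.2.2 = Δ := by rw [hstd, heq]; simp
    have hΔnil : Δ = [] := by rw [← e3]; exact hst
    subst hΔnil
    simp only [List.append_nil, List.foldl_nil, PySem.Set.update_nil] at heq
    have e2 : st.2.1 = dist := by rw [hstd, heq]
    dsimp only
    rw [e2]
    have hCnil : layersC E S (layersRn S R) = [] := by
      apply List.eq_nil_iff_forall_not_mem.mpr
      intro y hy
      unfold layersC at hy
      obtain ⟨hyRn, hyany⟩ := List.mem_filter.mp hy
      have hW : layersRn S R = V.filter (fun v => !(PySem.Set.contains vis v)) := hRS
      rw [hW] at hyRn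
      obtain ⟨hyV, hnc⟩ := List.mem_filter.mp hyRn
      have hyvis : y ∉ vis := (not_contains_iff vis y).mp hnc
      obtain ⟨u, huS, hdec⟩ := List.any_eq_true.mp hyany
      have hE : (u, y) ∈ E := by rwa [decide_eq_true_iff] at hdec
      have : y ∈ PySem.Set.update vis [] :=
        hcomp y (by simpa [PySem.Set.mem_ofList] using hyV) ⟨u, (hfs u).mpr huS, (mem_adj E u y).mpr hE⟩
      rw [PySem.Set.update_nil] at this
      exact hyvis this
    rw [layers, if_pos hCnil]
    refine ⟨?_, le_refl k, fun v j h => Or.inl h, fun v j h => h⟩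
    rw [pyRange_one_nil (le_refl k)]
    simp
  | case3 fr vis dist k hfr st hst ih =>
    intro R S hRS hfs hdb hdv
    obtain ⟨Δ, heq, hsound, hcomp⟩ := bfsStep_char (buildAdj E) (PySem.Set.ofList V) k fr vis dist []
    have hstd : st = bfsStep (buildAdj E) (PySem.Set.ofList V) k fr (vis, dist, []) := rfl
    have e1 : st.1 = PySem.Set.update vis Δ := by rw [hstd, heq]
    have e2 : st.2.1 = Δ.foldl (fun d y => d.insert y k) dist := by rw [hstd, heq]
    have e3 : st.2.2 = Δ := by rw [hstd, heq]; simp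
    have hΔne : Δ ≠ [] := by rw [← e3]; exact hst
    have hW : layersRn S R = V.filter (fun v => !(PySem.Set.contains vis v)) := hRS
    have hΔC : ∀ y : Int, y ∈ Δ ↔ y ∈ layersC E S (layersRn S R) := by
      intro y
      constructor
      · intro hy
        obtain ⟨hyVs, hyvis, x, hxfr, hyadj⟩ := hsound y hy
        have hyV : y ∈ V := by simpa [PySem.Set.mem_ofList] using hyVs
        unfold layersC
        apply List.mem_filter.mpr
        refine ⟨?_, ?_⟩
        · rw [hW]
          exact List.mem_filter.mpr ⟨hyV, (not_contains_iff vis y).mpr hyvis⟩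
        · exact List.any_eq_true.mpr
            ⟨x, (hfs x).mp hxfr, by rw [decide_eq_true_iff]; exact (mem_adj E x y).mp hyadj⟩
      · intro hy
        unfold layersC at hy
        obtain ⟨hyRn, hyany⟩ := List.mem_filter.mp hy
        rw [hW] at hyRn
        obtain ⟨hyV, hnc⟩ := List.mem_filter.mp hyRn
        have hyvis : y ∉ vis := (not_contains_iff vis y).mp hnc
        obtain ⟨u, huS, hdec⟩ := List.any_eq_true.mp hyany
        have hE : (u, y) ∈ E := by rwa [decide_eq_true_iff] at hdec
        have hmem : y ∈ PySem.Set.update vis Δ :=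
          hcomp y (by simpa [PySem.Set.mem_ofList] using hyV) ⟨u, (hfs u).mpr huS, (mem_adj E u y).mpr hE⟩
        rw [PySem.Set.mem_update] at hmem
        rcases hmem with hv | hΔ
        · exact absurd hv hyvis
        · exact hΔ
    have hCne : layersC E S (layersRn S R) ≠ [] := by
      obtain ⟨y, hy⟩ := List.exists_mem_of_ne_nil _ hΔne
      intro hc
      have := (hΔC y).mp hy
      rw [hc] at this
      cases this
    have hd' : ∀ v j : Int, st.2.1.get? v = some j → (v ∈ Δ ∧ j = k) ∨ (v ∉ Δ ∧ dist.get? v = some j) := by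
      intro v j h
      rw [e2, distUpd_get? k Δ dist v] at h
      by_cases hv : v ∈ Δ
      · rw [if_pos hv] at h; exact Or.inl ⟨hv, (Option.some.inj h).symm⟩
      · rw [if_neg hv] at h; exact Or.inr ⟨hv, h⟩
    have hd'2 : ∀ v : Int, v ∈ Δ → st.2.1.get? v = some k := by
      intro v hv; rw [e2, distUpd_get? k Δ dist v, if_pos hv]
    have hd'3 : ∀ v j : Int, dist.get? v = some j → st.2.1.get? v = some j := by
      intro v j h
      rw [e2, distUpd_get? k Δ dist v]
      by_cases hv : v ∈ Δ
      · obtain ⟨_, hnv, _⟩ := hsound v hv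
        rw [hdv v hnv] at h; cases h
      · rw [if_neg hv]; exact h
    obtain ⟨i1, i2, i3, i4⟩ := ih (layersRn S R) (layersC E S (layersRn S R))
      (by
        rw [hW, List.filter_filter, e1]
        apply List.filter_congr
        intro v _
        rw [Bool.eq_iff_iff]
        simp only [Bool.and_eq_true, contains_eq_false_iff, Bool.not_eq_true',
          decide_eq_false_iff_not, PySem.Set.mem_update]
        have hvc := hΔC v
        rw [hW] at hvc
        tauto)
      (by intro y; rw [e3]; exact hΔC y)
      (by
        intro v j h
        rcases hd' v j h with ⟨_, rfl⟩ | ⟨_, h0⟩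
        · omega
        · have := hdb v j h0; omega)
      (by
        intro v hnv
        rw [e1, PySem.Set.mem_update] at hnv
        push_neg at hnv
        rw [e2, distUpd_get? k Δ dist v, if_neg hnv.2]
        exact hdv v hnv.1)
    refine ⟨?_, by omega, ?_, ?_⟩
    · have hhead : V.filter (fun v => (bfs (buildAdj E) (PySem.Set.ofList V) st.2.2 st.1 st.2.1 (k + 1)).1.get? v == some k)
          = layersC E S (layersRn S R) := by
        have hpt : V.filter (fun v => (bfs (buildAdj E) (PySem.Set.ofList V) st.2.2 st.1 st.2.1 (k + 1)).1.get? v == some k)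
            = V.filter (fun v => decide (v ∈ layersC E S (layersRn S R))) := by
          apply List.filter_congr
          intro v _
          rw [Bool.eq_iff_iff, beq_iff_eq, decide_eq_true_iff]
          constructor
          · intro h
            rcases i3 v k h with hdist | ⟨hk, _⟩
            · rcases hd' v k hdist with ⟨hvΔ, _⟩ | ⟨_, hdist0⟩
              · exact (hΔC v).mp hvΔ
              · exact absurd (hdb v k hdist0) (lt_irrefl k)
            · omega
          · intro h
            exact i4 v k (hd'2 v ((hΔC v).mpr h))
        have hCform : layersC E S (layersRn S R)
            = V.filter (fun v => (!(PySem.Set.contains vis v)) && (S.any (fun u => decide ((u, v) ∈ E)))) := by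
          unfold layersC
          rw [hW, List.filter_filter]
          apply List.filter_congr
          intro v _
          rw [Bool.eq_iff_iff]
          simp only [Bool.and_eq_true]
          tauto
        rw [hpt, hCform]
        exact filter_mem_filter V _
      rw [layers, if_neg hCne]
      rw [PySem.List.pyRange_one_cons (show k < (bfs (buildAdj E) (PySem.Set.ofList V) st.2.2 st.1 st.2.1 (k + 1)).2 by omega)]
      rw [List.map_cons, hhead, i1]
    · intro v j h
      rcases i3 v j h with hdist | ⟨h1b, h2b⟩
      · rcases hd' v j hdist with ⟨hvΔ, rfl⟩ | ⟨_, hdist0⟩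
        · exact Or.inr ⟨le_refl j, by omega⟩
        · exact Or.inl hdist0
      · exact Or.inr ⟨by omega, h2b⟩
    · intro v j h
      exact i4 v j (hd'3 v j h)

theorem diff_eq_layersRn (V last : List Int) : PySem.Set.diff V last = layersRn last V := by
  unfold layersRn
  apply List.filter_congr
  intro v _
  show (!PySem.Set.contains last v) = !decide (v ∈ last)
  rw [Bool.eq_iff_iff]
  simp [PySem.Set.contains_iff]

theorem dcGo_eq (E : List (Int × Int)) (V : List Int) (D : List (List Int)) :
    V.Nodup → ∀ S, D.getLast? = some S → dcGo V E D = D ++ layers E V S := by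
  fun_induction dcGo V E D with
  | case1 V D hD =>
    intro _ S hS
    rw [hD] at hS
    cases hS
  | case2 V D last hD Vnew newC hnil =>
    intro hN S hS
    rw [hD] at hS
    injection hS with hS
    subst hS
    have hC : layersC E last (layersRn last V) = [] := by
      unfold layersC
      rw [← diff_eq_layersRn]
      rw [← pyNS_filter (PySem.Set.diff V last) E last (List.Nodup.filter _ hN)]
      exact hnil
    rw [layers, if_pos hC]
    simp
  | case3 V D last hD Vnew newC hnil ih =>
    intro hN S hS
    rw [hD] at hS
    injection hS with hS
    subst hS
    have hNd : (PySem.Set.diff V last).Nodup := List.Nodup.filter _ hN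
    have hC : layersC E last (layersRn last V) = pyNS (PySem.Set.diff V last) E last := by
      unfold layersC
      rw [← diff_eq_layersRn]
      exact (pyNS_filter (PySem.Set.diff V last) E last hNd).symm
    have hrec := ih hNd (pyNS (PySem.Set.diff V last) E last) (by rw [List.getLast?_concat])
    rw [layers, if_neg (by rw [hC]; exact hnil)]
    rw [hrec, hC, ← diff_eq_layersRn]
    simp
    exact ⟨rfl, rfl⟩

theorem glue (E : List (Int × Int)) (V : List Int) (base : List (List Int)) (S : List Int)
    (hN : V.Nodup) (hS : base.getLast? = some S) :
    dcGo V E base =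
      base ++ (PySem.List.pyRange 1 (bfs (buildAdj E) (PySem.Set.ofList V) S (PySem.Set.ofList S) PySem.Dict.empty 1).2 1).map
        (fun j => PySem.Set.ofList ((V.foldl (fun g v =>
            match (bfs (buildAdj E) (PySem.Set.ofList V) S (PySem.Set.ofList S) PySem.Dict.empty 1).1.get? v with
            | some j => g.modify j ([] : List Int) (fun l => l ++ [v])
            | none => g) PySem.Dict.empty).getD j [])) := by
  rw [dcGo_eq E V base hN S hS]
  have h1 : V.filter (fun v => !decide (v ∈ S))
      = V.filter (fun v => !(PySem.Set.contains (PySem.Set.ofList S) v)) :=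
    List.filter_congr (fun v _ => by
      rw [Bool.eq_iff_iff]
      simp [PySem.Set.contains_iff, PySem.Set.mem_ofList])
  obtain ⟨c1, _, _, _⟩ := bfs_layers E V S (PySem.Set.ofList S) PySem.Dict.empty 1 V S h1
    (fun y => Iff.rfl)
    (fun v j h => by rw [PySem.Dict.get?_empty v] at h; cases h)
    (fun v _ => PySem.Dict.get?_empty v)
  rw [← c1]
  congr 1
  apply List.map_congr_left
  intro j _
  rw [group_getD]
  rw [PySem.Dict.getD_empty j []]
  simp only [List.nil_append]
  exact (PySem.Set.ofList_eq_self_of_nodup _ (List.Nodup.filter _ hN)).symm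

-- ===== VERDICT (by name: the statement is the Claim_ definition above) =====
theorem distanceClasses_spec : Claim_equal_distanceClasses := by
  unfold Claim_equal_distanceClasses
  intro V E u D _ hPre
  obtain ⟨hN, hD⟩ := hPre
  unfold Spec_distanceClasses
  cases D with
  | none =>
    show dcGo V E [[u]] = distanceClasses_alt V E u none
    unfold distanceClasses_alt
    simp only
    exact glue E V [[u]] [u] hN rfl
  | some d =>
    have hd : d ≠ [] := fun hc => hD (by rw [hc])
    obtain ⟨S, hS⟩ := Option.ne_none_iff_exists'.mp (fun hc => hd (List.getLast?_eq_none_iff.mp hc))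
    show dcGo V E d = distanceClasses_alt V E u (some d)
    unfold distanceClasses_alt
    simp only [hS, Option.getD_some]
    exact glue E V d S hN hS
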